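-- pv_equiv track=rewrite | github.com/HelloGGX/Algorithm-Exercises | 10.21.py | cpu_scheduler_corrected
-- ===== SOURCE A (Python) =====
-- import heapq
--
-- def cpu_scheduler_corrected(tasks: list[list[int]]) -> list[int]:
--     n = len(tasks)
--     tasks_with_indices = sorted([(tasks[i][0], tasks[i][1], i) for i in range(n)])
--
--     current_time = 0
--     result_order = []
--     task_index = 0
--     available_tasks_pq = []
--
--     while len(result_order) < n:
--
--         while task_index < n and tasks_with_indices[task_index][0] <= current_time:
--             enq_time, proc_time, orig_idx = tasks_with_indices[task_index]
--             heapq.heappush(available_tasks_pq, (proc_time, enq_time, orig_idx))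
--             task_index += 1
--
--         if not available_tasks_pq and task_index < n:
--             current_time = tasks_with_indices[task_index][0]
--             continue
--
--         if available_tasks_pq:
--             proc_time, enq_time, orig_idx = heapq.heappop(available_tasks_pq)
--             result_order.append(orig_idx)
--             current_time += proc_time
--         elif task_index == n and not available_tasks_pq:
--             break
--
--     return result_order
-- ===== SOURCE B (Python) =====
-- def cpu_scheduler_corrected(tasks: list[list[int]]) -> list[int]:
--     # repeated min-scans over a plain "remaining / available" partition; no sort, no heap
--     rem = [(task[1], task[0], i) for i, task in enumerate(tasks)]
--     avail = []
--     order = []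
--     t = 0
--     while rem or avail:
--         avail = avail + [x for x in rem if x[1] <= t]
--         rem = [x for x in rem if x[1] > t]
--         if not avail:
--             t = min(x[1] for x in rem)
--             avail = [x for x in rem if x[1] <= t]
--             rem = [x for x in rem if x[1] > t]
--         p, e, i = min(avail)
--         avail.remove((p, e, i))
--         order.append(i)
--         t += p
--     return order
-- ===== Notes on version B (the rewrite author's own statement) =====
-- stated objective: simpler
-- what changed: Replaced the pre-sort plus binary-heap priority queue with a plain remaining/available list partition and a repeated linear min-scan by the full (proc,enq,idx) key; tasks move to the available list once their enqueue time is reached and stay there.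
import Mathlib
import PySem

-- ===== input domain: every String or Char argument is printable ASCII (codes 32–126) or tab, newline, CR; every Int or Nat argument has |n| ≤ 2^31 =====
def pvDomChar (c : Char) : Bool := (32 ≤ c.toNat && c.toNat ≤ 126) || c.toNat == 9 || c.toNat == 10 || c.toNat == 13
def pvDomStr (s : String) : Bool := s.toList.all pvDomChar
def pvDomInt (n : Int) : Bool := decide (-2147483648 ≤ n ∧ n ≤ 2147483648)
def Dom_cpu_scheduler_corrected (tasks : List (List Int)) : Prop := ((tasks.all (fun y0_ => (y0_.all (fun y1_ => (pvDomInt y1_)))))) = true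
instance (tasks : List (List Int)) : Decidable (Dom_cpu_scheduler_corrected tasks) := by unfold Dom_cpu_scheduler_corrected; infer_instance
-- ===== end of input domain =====

-- B replaces A's pre-sort + binary-heap priority queue by a plain remaining/available
-- partition with repeated linear min-scans (objective: simpler; return values proved equal).

-- Python's lexicographic `<` on int 3-tuples (exact: total order on Int × Int × Int)
def pvLexLt (a b : Int × Int × Int) : Bool :=
  if a.1 < b.1 then true else if b.1 < a.1 then false
  else if a.2.1 < b.2.1 then true else if b.2.1 < a.2.1 then false
  else decide (a.2.2 < b.2.2)

-- ===== PORT A =====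
-- `heapq` on distinct, totally ordered int triples is modelled exactly by a list kept
-- sorted by pvLexLt: heappush = sorted insertion, heappop = take the head (the unique
-- minimum, which is what heappop returns).
def pvInsort (x : Int × Int × Int) : List (Int × Int × Int) → List (Int × Int × Int)
  | [] => [x]
  | y :: ys => if pvLexLt x y then x :: y :: ys else y :: pvInsort x ys

-- sorted(...) on int triples: stable insertion sort by Python tuple order (ported by
-- hand because the triples are compared lexicographically)
def pvIsort (l : List (Int × Int × Int)) : List (Int × Int × Int) :=
  l.foldl (fun acc x => pvInsort x acc) []

-- the inner `while task_index < n and ...: heappush ...` loop; the remaining suffix of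
-- tasks_with_indices stands for task_index
def pvAPush (ct : Int) : List (Int × Int × Int) → List (Int × Int × Int) →
    (List (Int × Int × Int)) × (List (Int × Int × Int))
  | [], pq => ([], pq)
  | (e, p, i) :: rest, pq =>
    if e ≤ ct then pvAPush ct rest (pvInsort (p, e, i) pq) else ((e, p, i) :: rest, pq)

-- the outer `while len(result_order) < n` loop; fuel only makes the recursion structural
-- (2*n+1 steps always suffice: each iteration either pops or is a `continue` that is
-- immediately followed by a pop)
def pvALoop (n : Nat) : Nat → Int → List Int → List (Int × Int × Int) →
    List (Int × Int × Int) → List Int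
  | 0, _, res, _, _ => res
  | fuel + 1, ct, res, susp, pq =>
    if res.length < n then
      match pvAPush ct susp pq with
      | (susp', []) =>
        match susp' with
        | [] => res                                        -- the `break` branch
        | (e, p, i) :: rest => pvALoop n fuel e res ((e, p, i) :: rest) []   -- `continue`
      | (susp', (p, _, i) :: pqrest) =>
        pvALoop n fuel (ct + p) (res ++ [i]) susp' pqrest  -- heappop + append
    else res

def cpu_scheduler_corrected (tasks : List (List Int)) : List Int :=
  let n := tasks.length
  let twi := pvIsort ((PySem.List.pyRange 0 (n : Int) 1).map (fun i =>
    (PySem.List.pyGetD (PySem.List.pyGetD tasks i []) 0 0,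
     PySem.List.pyGetD (PySem.List.pyGetD tasks i []) 1 0,
     i)))
  pvALoop n (2 * n + 1) 0 [] twi []

-- ===== PORT B =====
-- min(xs) on int triples: left fold keeping the smaller element
def pvBMin (a : Int × Int × Int) : List (Int × Int × Int) → (Int × Int × Int)
  | [] => a
  | y :: ys => pvBMin (if pvLexLt y a then y else a) ys

-- the `while rem or avail` loop of Source B; fuel (= number of tasks) only makes the
-- recursion structural — each iteration schedules exactly one task
def pvBLoop : Nat → List (Int × Int × Int) → List (Int × Int × Int) → Int →
    List Int → List Int
  | 0, _, _, _, order => order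
  | fuel + 1, rem, avail, t, order =>
    if rem.isEmpty && avail.isEmpty then order
    else
      match avail ++ rem.filter (fun x => decide (x.2.1 ≤ t)),
            rem.filter (fun x => decide (t < x.2.1)) with
      | [], rem1 =>
        match rem1 with
        | [] => order                                       -- unreachable totality guard
        | r :: rs =>
          -- t1 = min(x[1] for x in rem); m = min(avail)  (written inline)
          match rem1.filter (fun x => decide (x.2.1 ≤ (rs.map (fun x => x.2.1)).foldl min r.2.1)),
                rem1.filter (fun x => decide ((rs.map (fun x => x.2.1)).foldl min r.2.1 < x.2.1)) with
          | [], _ => order                                  -- unreachable totality guard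
          | a :: as_, rem2 =>
            pvBLoop fuel rem2 ((a :: as_).erase (pvBMin a as_))
              ((rs.map (fun x => x.2.1)).foldl min r.2.1 + (pvBMin a as_).1)
              (order ++ [(pvBMin a as_).2.2])
      | a :: as_, rem1 =>
        pvBLoop fuel rem1 ((a :: as_).erase (pvBMin a as_)) (t + (pvBMin a as_).1)
          (order ++ [(pvBMin a as_).2.2])

def cpu_scheduler_corrected_alt (tasks : List (List Int)) : List Int :=
  let rem := (PySem.List.enumerate tasks).map (fun x =>
    (PySem.List.pyGetD x.2 1 0, PySem.List.pyGetD x.2 0 0, x.1))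
  pvBLoop rem.length rem [] 0 []

-- ===== PRECONDITION & SPEC =====
-- Pre_ excludes exactly the inputs on which Python A raises IndexError
-- (an inner list with fewer than two elements; B raises there too).
def Pre_cpu_scheduler_corrected (tasks : List (List Int)) : Prop :=
  ∀ l ∈ tasks, 2 ≤ l.length
instance (tasks : List (List Int)) : Decidable (Pre_cpu_scheduler_corrected tasks) := by
  unfold Pre_cpu_scheduler_corrected; infer_instance

def pvWitness_cpu_scheduler_corrected : List (List Int) := [[1, 2], [0, 3]]

def Spec_cpu_scheduler_corrected (tasks : List (List Int)) (out : List Int) : Prop := out = cpu_scheduler_corrected_alt tasks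
instance (tasks : List (List Int)) (out : List Int) : Decidable (Spec_cpu_scheduler_corrected tasks out) := by unfold Spec_cpu_scheduler_corrected; infer_instance

-- ===== CLAIM (what is proved, stated in full; the proofs are below) =====
def Claim_equal_cpu_scheduler_corrected : Prop := ∀ (tasks : List (List Int)), Dom_cpu_scheduler_corrected tasks → Pre_cpu_scheduler_corrected tasks → Spec_cpu_scheduler_corrected tasks (cpu_scheduler_corrected tasks)

-- ===== LEMMAS AND PROOFS =====

theorem pvLexLt_eq_decide (a b : Int × Int × Int) :
    pvLexLt a b = decide (a.1 < b.1 ∨ (a.1 = b.1 ∧ (a.2.1 < b.2.1 ∨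
      (a.2.1 = b.2.1 ∧ a.2.2 < b.2.2)))) := by
  obtain ⟨a1, a2, a3⟩ := a; obtain ⟨b1, b2, b3⟩ := b
  simp only [pvLexLt]
  split_ifs <;> (try rw [decide_eq_decide]) <;> (try simp) <;> omega

theorem pvLexLt_irrefl (a : Int × Int × Int) : pvLexLt a a = false := by
  rw [pvLexLt_eq_decide]; simp

theorem pvLexLt_asymm {a b : Int × Int × Int} (h : pvLexLt a b = true) :
    pvLexLt b a = false := by
  rw [pvLexLt_eq_decide] at *; simp at *; omega

theorem pvLexLt_trans {a b c : Int × Int × Int} (h1 : pvLexLt a b = true)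
    (h2 : pvLexLt b c = true) : pvLexLt a c = true := by
  rw [pvLexLt_eq_decide] at *; simp at *; omega

theorem pvLexLt_antisymm {a b : Int × Int × Int} (h1 : pvLexLt a b = false)
    (h2 : pvLexLt b a = false) : a = b := by
  obtain ⟨a1, a2, a3⟩ := a; obtain ⟨b1, b2, b3⟩ := b
  rw [pvLexLt_eq_decide] at h1 h2; simp at h1 h2
  simp only [Prod.mk.injEq]; omega

theorem pvLexLt_le_trans {a b c : Int × Int × Int} (h1 : pvLexLt b a = false)
    (h2 : pvLexLt c b = false) : pvLexLt c a = false := by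
  rw [pvLexLt_eq_decide] at *; simp at *; omega

theorem pvLexLt_false_fst_le {x y : Int × Int × Int} (h : pvLexLt y x = false) :
    x.1 ≤ y.1 := by
  rw [pvLexLt_eq_decide] at h; simp at h; omega

-- le-sortedness (head is the minimum)
def pvSorted (l : List (Int × Int × Int)) : Prop :=
  List.Pairwise (fun a b => pvLexLt b a = false) l

-- the swap between the (enq, proc, idx) and (proc, enq, idx) encodings
def pvSw : (Int × Int × Int) → (Int × Int × Int) := fun x => (x.2.1, x.1, x.2.2)

theorem pvInsort_perm (x : Int × Int × Int) (l : List (Int × Int × Int)) :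
    (pvInsort x l).Perm (x :: l) := by
  induction l with
  | nil => simp [pvInsort]
  | cons y ys ih =>
    simp only [pvInsort]
    split
    · exact List.Perm.refl _
    · exact ((ih.cons y).trans (List.Perm.swap x y ys))

theorem pvInsort_sorted {x : Int × Int × Int} {l : List (Int × Int × Int)}
    (h : pvSorted l) : pvSorted (pvInsort x l) := by
  induction l with
  | nil => simp [pvInsort, pvSorted]
  | cons y ys ih =>
    rcases (List.pairwise_cons.mp h) with ⟨hy, hys⟩
    simp only [pvInsort]
    split
    · rename_i hlt
      refine List.Pairwise.cons ?_ (List.Pairwise.cons hy hys)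
      intro z hz
      rcases List.mem_cons.mp hz with rfl | hz
      · exact pvLexLt_asymm hlt
      · exact pvLexLt_le_trans (pvLexLt_asymm hlt) (hy z hz)
    · rename_i hlt
      refine List.Pairwise.cons ?_ (ih hys)
      intro z hz
      have hz' := (pvInsort_perm x ys).mem_iff.mp hz
      rcases List.mem_cons.mp hz' with rfl | hz'
      · simpa using hlt
      · exact hy z hz'

theorem pvPushList_perm (f : (Int × Int × Int) → (Int × Int × Int))
    (l acc : List (Int × Int × Int)) :
    (l.foldl (fun q x => pvInsort (f x) q) acc).Perm (acc ++ l.map f) := by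
  induction l generalizing acc with
  | nil => simp
  | cons x xs ih =>
    simp only [List.foldl_cons, List.map_cons]
    refine (ih (pvInsort (f x) acc)).trans ?_
    refine (List.Perm.append_right _ (pvInsort_perm (f x) acc)).trans ?_
    exact (List.perm_middle).symm

theorem pvPushList_sorted (f : (Int × Int × Int) → (Int × Int × Int))
    (l : List (Int × Int × Int)) {acc : List (Int × Int × Int)} (h : pvSorted acc) :
    pvSorted (l.foldl (fun q x => pvInsort (f x) q) acc) := by
  induction l generalizing acc with
  | nil => simpa
  | cons x xs ih => exact ih (pvInsort_sorted h)

theorem pvIsort_perm (l : List (Int × Int × Int)) : (pvIsort l).Perm l := by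
  have := pvPushList_perm id l []
  simpa [pvIsort] using this

theorem pvIsort_sorted (l : List (Int × Int × Int)) : pvSorted (pvIsort l) := by
  have h0 : pvSorted ([] : List (Int × Int × Int)) := List.Pairwise.nil
  have h := pvPushList_sorted id l h0
  simpa [pvIsort] using h

theorem pvBMin_spec (a : Int × Int × Int) (l : List (Int × Int × Int)) :
    pvBMin a l ∈ a :: l ∧ ∀ y ∈ a :: l, pvLexLt y (pvBMin a l) = false := by
  induction l generalizing a with
  | nil =>
    refine ⟨by simp [pvBMin], ?_⟩
    intro y hy; rcases List.mem_cons.mp hy with rfl | hy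
    · simp [pvBMin, pvLexLt_irrefl]
    · simp at hy
  | cons b l ih =>
    by_cases hba : pvLexLt b a = true
    · have hred : pvBMin a (b :: l) = pvBMin b l := by simp [pvBMin, hba]
      obtain ⟨hmem, hmin⟩ := ih b
      rw [hred]
      refine ⟨?_, ?_⟩
      · rcases List.mem_cons.mp hmem with hm | hm <;> simp [hm]
      · intro y hy
        rcases List.mem_cons.mp hy with rfl | hy
        · have hb := hmin b (List.mem_cons_self ..)
          by_contra hya
          simp only [Bool.not_eq_false] at hya
          have h2 := pvLexLt_trans hba hya
          rw [h2] at hb; cases hb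
        · exact hmin y hy
    · simp only [Bool.not_eq_true] at hba
      have hred : pvBMin a (b :: l) = pvBMin a l := by simp [pvBMin, hba]
      obtain ⟨hmem, hmin⟩ := ih a
      rw [hred]
      refine ⟨?_, ?_⟩
      · rcases List.mem_cons.mp hmem with hm | hm <;> simp [hm]
      · intro y hy
        rcases List.mem_cons.mp hy with rfl | hy
        · exact hmin y (List.mem_cons_self ..)
        rcases List.mem_cons.mp hy with rfl | hy
        · exact pvLexLt_le_trans (hmin a (List.mem_cons_self ..)) hba
        · exact hmin y (List.mem_cons_of_mem _ hy)

theorem pvSorted_head_min {m : Int × Int × Int} {l : List (Int × Int × Int)}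
    (h : pvSorted (m :: l)) : ∀ y ∈ m :: l, pvLexLt y m = false := by
  intro y hy
  rcases List.mem_cons.mp hy with rfl | hy
  · exact pvLexLt_irrefl y
  · exact (List.pairwise_cons.mp h).1 y hy

theorem pvMin_unique {l l' : List (Int × Int × Int)} (hp : l.Perm l')
    {m m' : Int × Int × Int} (hm : m ∈ l) (hm' : m' ∈ l')
    (hmin : ∀ y ∈ l, pvLexLt y m = false) (hmin' : ∀ y ∈ l', pvLexLt y m' = false) :
    m = m' :=
  pvLexLt_antisymm (hmin' m (hp.mem_iff.mp hm)) (hmin m' (hp.mem_iff.mpr hm'))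

theorem pvAPush_eq (ct : Int) (susp pq : List (Int × Int × Int)) (h : pvSorted susp) :
    pvAPush ct susp pq =
      (susp.filter (fun x => decide (ct < x.1)),
       (susp.filter (fun x => decide (x.1 ≤ ct))).foldl
         (fun q x => pvInsort (pvSw x) q) pq) := by
  induction susp generalizing pq with
  | nil => simp [pvAPush]
  | cons x rest ih =>
    obtain ⟨e, p, i⟩ := x
    rcases (List.pairwise_cons.mp h) with ⟨hx, hrest⟩
    by_cases he : e ≤ ct
    · have h1 : ¬ ct < (e, p, i).1 := by simp; omega
      simp only [pvAPush, if_pos he, ih _ hrest, List.filter_cons]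
      simp [he, h1, pvSw]
    · have hall : ∀ y ∈ rest, ct < y.1 := by
        intro y hy
        have := pvLexLt_false_fst_le (hx y hy)
        simp only at this ⊢; omega
      have h2 : rest.filter (fun x => decide (ct < x.1)) = rest :=
        List.filter_eq_self.mpr (by intro y hy; simpa using hall y hy)
      have h3 : rest.filter (fun x => decide (x.1 ≤ ct)) = [] :=
        List.filter_eq_nil_iff.mpr (by intro y hy; have := hall y hy; simp; omega)
      have h4 : ct < (e, p, i).1 := by simp; omega
      simp only [pvAPush, if_neg he, List.filter_cons]
      simp [he, h2, h3, h4]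

theorem pvFilterSplit (t : Int) (f : (Int × Int × Int) → Int)
    (l : List (Int × Int × Int)) :
    (l.filter (fun x => decide (f x ≤ t))).length +
      (l.filter (fun x => decide (t < f x))).length = l.length := by
  induction l with
  | nil => simp
  | cons x xs ih =>
    by_cases h : f x ≤ t
    · have h2 : ¬ t < f x := not_lt.mpr h
      simp [h, h2]; omega
    · have h2 : t < f x := not_le.mp h
      simp [h, h2]; omega

theorem pvFoldlMin_spec (a : Int) (l : List Int) :
    (l.foldl min a) ∈ a :: l ∧ ∀ b ∈ a :: l, l.foldl min a ≤ b := by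
  induction l generalizing a with
  | nil => simp
  | cons x xs ih =>
    obtain ⟨hm, hle⟩ := ih (min a x)
    constructor
    · simp only [List.foldl_cons]
      rcases List.mem_cons.mp hm with hm | hm
      · rcases min_choice a x with h | h <;> rw [h] at hm ⊢ <;> simp [hm]
      · simp [hm]
    · intro b hb
      simp only [List.foldl_cons]
      rcases List.mem_cons.mp hb with rfl | hb
      · exact le_trans (hle _ (List.mem_cons_self ..)) (min_le_left _ _)
      rcases List.mem_cons.mp hb with rfl | hb
      · exact le_trans (hle _ (List.mem_cons_self ..)) (min_le_right _ _)
      · exact hle b (List.mem_cons_of_mem _ hb)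

theorem pvPermFilterLe {rem susp : List (Int × Int × Int)}
    (h : rem.Perm (susp.map pvSw)) (t : Int) :
    (rem.filter (fun x => decide (x.2.1 ≤ t))).Perm
      ((susp.filter (fun x => decide (x.1 ≤ t))).map pvSw) := by
  refine (h.filter _).trans ?_
  rw [List.filter_map]
  exact List.Perm.refl _

theorem pvPermFilterGt {rem susp : List (Int × Int × Int)}
    (h : rem.Perm (susp.map pvSw)) (t : Int) :
    (rem.filter (fun x => decide (t < x.2.1))).Perm
      ((susp.filter (fun x => decide (t < x.1))).map pvSw) := by
  refine (h.filter _).trans ?_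
  rw [List.filter_map]
  exact List.Perm.refl _

-- ===== the main bisimulation =====
theorem pvMain : ∀ (fuelA n fuelB : Nat)
    (susp pq rem avail : List (Int × Int × Int)) (ct : Int) (res : List Int),
    pvSorted susp → pvSorted pq →
    rem.Perm (susp.map pvSw) → avail.Perm pq →
    res.length + susp.length + pq.length = n →
    2 * (susp.length + pq.length) + 1 ≤ fuelA →
    susp.length + pq.length ≤ fuelB →
    pvALoop n fuelA ct res susp pq = pvBLoop fuelB rem avail ct res := by
  intro fuelA
  induction fuelA using Nat.strong_induction_on with
  | _ fuelA IH =>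
  intro n fuelB susp pq rem avail ct res hs hq hrem havail hlen hfA hfB
  obtain ⟨fA, rfl⟩ : ∃ fA, fuelA = fA + 1 := ⟨fuelA - 1, by omega⟩
  by_cases hk : susp.length + pq.length = 0
  · have hsusp : susp = [] := List.length_eq_zero_iff.mp (by omega)
    have hpq : pq = [] := List.length_eq_zero_iff.mp (by omega)
    subst hsusp; subst hpq
    have hrem' : rem.Perm [] := by simpa using hrem
    have hrem0 : rem = [] := hrem'.eq_nil
    have havail0 : avail = [] := havail.eq_nil
    subst hrem0; subst havail0
    have hng : ¬ res.length < n := by simp at hlen; omega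
    cases fuelB with
    | zero => simp [pvALoop, hng, pvBLoop]
    | succ fB => simp [pvALoop, hng, pvBLoop]
  · have hklt : res.length < n := by omega
    obtain ⟨fB, rfl⟩ : ∃ fB, fuelB = fB + 1 := ⟨fuelB - 1, by omega⟩
    have hremlen : rem.length = susp.length := by simpa using hrem.length_eq
    have havlen : avail.length = pq.length := havail.length_eq
    have hnotempty : (rem.isEmpty && avail.isEmpty) = false := by
      cases rem with
      | nil =>
        cases avail with
        | nil => simp at hremlen havlen; omega
        | cons a t => simp
      | cons a t => simp
    have hq' := pvPushList_sorted pvSw (susp.filter (fun x => decide (x.1 ≤ ct))) hq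
    have hpq'perm := pvPushList_perm pvSw (susp.filter (fun x => decide (x.1 ≤ ct))) pq
    have hs' : pvSorted (susp.filter (fun x => decide (ct < x.1))) :=
      List.Pairwise.filter _ hs
    have hnew := pvPermFilterLe hrem ct
    have hrem1 := pvPermFilterGt hrem ct
    have havail1 : (avail ++ rem.filter (fun x => decide (x.2.1 ≤ ct))).Perm
        ((susp.filter (fun x => decide (x.1 ≤ ct))).foldl
          (fun q x => pvInsort (pvSw x) q) pq) :=
      (havail.append hnew).trans hpq'perm.symm
    have hsplitS := pvFilterSplit ct (fun x => x.1) susp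
    have hpq'len : ((susp.filter (fun x => decide (x.1 ≤ ct))).foldl
          (fun q x => pvInsort (pvSw x) q) pq).length
        = pq.length + (susp.filter (fun x => decide (x.1 ≤ ct))).length := by
      simpa using hpq'perm.length_eq
    simp only [pvALoop, if_pos hklt, pvAPush_eq ct susp pq hs]
    simp only [pvBLoop, hnotempty, Bool.false_eq_true, if_false]
    rcases hpq'c : (susp.filter (fun x => decide (x.1 ≤ ct))).foldl
        (fun q x => pvInsort (pvSw x) q) pq with _ | ⟨m, rest⟩
    · -- the `continue` round: the heap is empty after the push phase
      rw [hpq'c] at havail1 hq' hpq'perm hpq'len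
      have hEmpty : pq ++ (susp.filter (fun x => decide (x.1 ≤ ct))).map pvSw = [] :=
        hpq'perm.symm.eq_nil
      rcases List.append_eq_nil_iff.mp hEmpty with ⟨hpqnil, hmapnil⟩
      have hpushednil : susp.filter (fun x => decide (x.1 ≤ ct)) = [] := by
        simpa using hmapnil
      subst hpqnil
      have havailnil : avail = [] := havail.eq_nil
      subst havailnil
      have hfilnil : rem.filter (fun x => decide (x.2.1 ≤ ct)) = [] := by
        have h5 := hnew; rw [hpushednil] at h5; simpa using h5.eq_nil
      have hsuspall : ∀ x ∈ susp, ct < x.1 := by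
        intro x hx
        have h5 := List.filter_eq_nil_iff.mp hpushednil x hx
        simp at h5; omega
      have hsusp' : susp.filter (fun x => decide (ct < x.1)) = susp :=
        List.filter_eq_self.mpr (fun x hx => by simpa using hsuspall x hx)
      rcases susp with _ | ⟨⟨e, p, i⟩, restS⟩
      · simp at hk
      rw [hsusp', hfilnil]
      simp only [hpq'c, List.append_nil]
      rcases hr1c : rem.filter (fun x => decide (ct < x.2.1)) with _ | ⟨r, rs⟩
      · exfalso
        have h5 := hrem1; rw [hsusp', hr1c] at h5
        have := h5.length_eq; simp at this
      simp only [hr1c]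
      have h5 : (r :: rs).Perm (((e, p, i) :: restS).map pvSw) := by
        have h6 := hrem1; rw [hsusp', hr1c] at h6; exact h6
      have hperm_e : ((r :: rs).map (fun x => x.2.1)).Perm
          (((e, p, i) :: restS).map (fun x => x.1)) := by
        have h6 := h5.map (fun x => x.2.1)
        rw [List.map_map] at h6
        exact h6
      have ht1 : (rs.map (fun x => x.2.1)).foldl min r.2.1 = e := by
        obtain ⟨hmem, hmin⟩ := pvFoldlMin_spec r.2.1 (rs.map (fun x => x.2.1))
        have hlisteq : r.2.1 :: rs.map (fun x => x.2.1)
            = (r :: rs).map (fun x => x.2.1) := by simp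
        rw [hlisteq] at hmem hmin
        have hemem : e ∈ ((e, p, i) :: restS).map (fun x => x.1) := by simp
        have hemin : ∀ y ∈ ((e, p, i) :: restS).map (fun x => x.1), e ≤ y := by
          intro y hy
          rcases List.mem_map.mp hy with ⟨z, hz, rfl⟩
          exact pvLexLt_false_fst_le (pvSorted_head_min hs z hz)
        have h7 := hemin _ (hperm_e.mem_iff.mp hmem)
        have h8 := hmin _ (hperm_e.mem_iff.mpr hemem)
        omega
      rw [ht1]
      have havail2 := pvPermFilterLe h5 e
      have hrem2 := pvPermFilterGt h5 e
      have hin2 : (e, p, i) ∈ ((e, p, i) :: restS).filter (fun x => decide (x.1 ≤ e)) := by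
        simp
      rcases hav2c : (r :: rs).filter (fun x => decide (x.2.1 ≤ e)) with _ | ⟨a2, as2⟩
      · exfalso
        rw [hav2c] at havail2
        have h9 := havail2.symm.eq_nil
        have h10 := List.mem_map_of_mem hin2 (f := pvSw)
        rw [h9] at h10; simp at h10
      rw [hav2c] at havail2
      simp only [hav2c]
      -- second unfolding of A (the iteration right after `continue`)
      cases fA with
      | zero => omega
      | succ fA2 =>
        have hs2 : pvSorted ((e, p, i) :: restS) := hs
        have hq2' := pvPushList_sorted pvSw
          (((e, p, i) :: restS).filter (fun x => decide (x.1 ≤ e))) (List.Pairwise.nil)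
        have hpq2perm := pvPushList_perm pvSw
          (((e, p, i) :: restS).filter (fun x => decide (x.1 ≤ e))) []
        have hs2' : pvSorted (((e, p, i) :: restS).filter (fun x => decide (e < x.1))) :=
          List.Pairwise.filter _ hs2
        have hsplit2 := pvFilterSplit e (fun x => x.1) ((e, p, i) :: restS)
        rw [List.nil_append] at hpq2perm
        simp only [pvALoop, if_pos hklt, pvAPush_eq e ((e, p, i) :: restS) [] hs2]
        rcases hpq2c : (((e, p, i) :: restS).filter (fun x => decide (x.1 ≤ e))).foldl
            (fun q x => pvInsort (pvSw x) q) [] with _ | ⟨m2, rest2⟩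
        · exfalso
          rw [hpq2c] at hpq2perm
          have h9 := hpq2perm.symm.eq_nil
          have h10 := List.mem_map_of_mem hin2 (f := pvSw)
          rw [h9] at h10; simp at h10
        obtain ⟨p2, e2, i2⟩ := m2
        rw [hpq2c] at hpq2perm hq2'
        simp only [hpq2c]
        obtain ⟨hm'mem, hm'min⟩ := pvBMin_spec a2 as2
        have hA2P : (a2 :: as2).Perm ((p2, e2, i2) :: rest2) :=
          havail2.trans hpq2perm.symm
        have hmu : pvBMin a2 as2 = (p2, e2, i2) :=
          pvMin_unique hA2P hm'mem (List.mem_cons_self ..) hm'min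
            (pvSorted_head_min hq2')
        rw [hmu]
        have hl1 : rest2.length + 1
            = (((e, p, i) :: restS).filter (fun x => decide (x.1 ≤ e))).length := by
          simpa using hpq2perm.length_eq
        apply IH fA2 (by omega)
        · exact hs2'
        · exact (List.pairwise_cons.mp hq2').2
        · exact hrem2
        · have h9 := hA2P.erase (p2, e2, i2)
          simpa [List.erase_cons_head] using h9
        · simp only [List.length_append, List.length_cons, List.length_nil] at hlen hsplit2 hl1 ⊢
          omega
        · simp only [List.length_cons, List.length_nil] at hsplit2 hl1 hfA ⊢
          omega
        · simp only [List.length_cons, List.length_nil] at hsplit2 hl1 hfB ⊢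
          omega
    · -- the normal round: pop the heap minimum
      obtain ⟨p2, e2, i2⟩ := m
      rw [hpq'c] at havail1 hq' hpq'len
      rcases hav1c : avail ++ rem.filter (fun x => decide (x.2.1 ≤ ct)) with _ | ⟨a1, as1⟩
      · exfalso
        rw [hav1c] at havail1
        have := havail1.length_eq; simp at this
      rw [hav1c] at havail1
      simp only [hpq'c]
      obtain ⟨hm'mem, hm'min⟩ := pvBMin_spec a1 as1
      have hmu : pvBMin a1 as1 = (p2, e2, i2) :=
        pvMin_unique havail1 hm'mem (List.mem_cons_self ..) hm'min
          (pvSorted_head_min hq')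
      rw [hmu]
      apply IH fA (by omega)
      · exact hs'
      · exact (List.pairwise_cons.mp hq').2
      · exact hrem1
      · have h9 := havail1.erase (p2, e2, i2)
        simpa [List.erase_cons_head] using h9
      · simp only [List.length_append, List.length_cons, List.length_nil] at hlen hsplitS hpq'len ⊢
        omega
      · simp only [List.length_cons] at hsplitS hpq'len hfA ⊢
        omega
      · simp only [List.length_cons] at hsplitS hpq'len hfB ⊢
        omega

theorem cpu_scheduler_corrected_spec' (tasks : List (List Int)) :
    cpu_scheduler_corrected tasks = cpu_scheduler_corrected_alt tasks := by
  have hBA : (PySem.List.enumerate tasks).map (fun x =>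
        (PySem.List.pyGetD x.2 1 0, PySem.List.pyGetD x.2 0 0, x.1))
      = ((PySem.List.pyRange 0 (tasks.length : Int) 1).map (fun i =>
          (PySem.List.pyGetD (PySem.List.pyGetD tasks i []) 0 0,
           PySem.List.pyGetD (PySem.List.pyGetD tasks i []) 1 0,
           i))).map pvSw := by
    rw [PySem.List.enumerate_eq_map_pyRange (d := []), List.map_map, List.map_map]
    rfl
  have hIlen := (pvIsort_perm ((PySem.List.pyRange 0 (tasks.length : Int) 1).map (fun i =>
      (PySem.List.pyGetD (PySem.List.pyGetD tasks i []) 0 0,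
       PySem.List.pyGetD (PySem.List.pyGetD tasks i []) 1 0,
       i)))).length_eq
  simp only [List.length_map, PySem.List.length_pyRange_one] at hIlen
  have hIlen' : (pvIsort ((PySem.List.pyRange 0 (tasks.length : Int) 1).map (fun i =>
      (PySem.List.pyGetD (PySem.List.pyGetD tasks i []) 0 0,
       PySem.List.pyGetD (PySem.List.pyGetD tasks i []) 1 0,
       i)))).length = tasks.length := by omega
  simp only [cpu_scheduler_corrected, cpu_scheduler_corrected_alt]
  refine pvMain _ _ _ _ _ _ _ _ _ (pvIsort_sorted _) List.Pairwise.nil ?_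
    (List.Perm.refl []) ?_ ?_ ?_
  · rw [hBA]
    exact (List.Perm.map pvSw (pvIsort_perm _)).symm
  · simp [hIlen']
  · simp [hIlen']
  · rw [hBA]
    simp [hIlen']

-- ===== VERDICT (by name: the statement is the Claim_ definition above) =====
theorem cpu_scheduler_corrected_spec : Claim_equal_cpu_scheduler_corrected := by
  intro tasks _ _
  unfold Spec_cpu_scheduler_corrected
  exact cpu_scheduler_corrected_spec' tasks
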